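-- pv_equiv track=rewrite | github.com/suixin233/OJ | caozuoxulie.py | caozuo
-- ===== SOURCE A (Python) =====
-- import copy
--
-- def caozuo(n, line):
--     seq = copy.copy(line)
--     seqb = []
--     for i in range(n):
--         seqb.append(seq[i])
--         n = len(seqb)
--         tmp = []
--         for j in reversed(seqb):
--             tmp.append(j)
--         seqb = copy.copy(tmp)
--     return seqb
-- ===== SOURCE B (Python) =====
-- def caozuo(n, line):
--     # Single partition-by-index-parity pass, then one assembly (no repeated reversals).
--     even, odd = [], []
--     for i in range(n):
--         (even if i % 2 == 0 else odd).append(line[i])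
--     if n % 2 == 1:
--         return even[::-1] + odd
--     return odd[::-1] + even
-- ===== Notes on version B (the rewrite author's own statement) =====
-- stated objective: faster
-- what changed: Replaces A's per-iteration append-then-reverse of the whole accumulator with a single pass that partitions elements by index parity and assembles the result once at the end.
import Mathlib
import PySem

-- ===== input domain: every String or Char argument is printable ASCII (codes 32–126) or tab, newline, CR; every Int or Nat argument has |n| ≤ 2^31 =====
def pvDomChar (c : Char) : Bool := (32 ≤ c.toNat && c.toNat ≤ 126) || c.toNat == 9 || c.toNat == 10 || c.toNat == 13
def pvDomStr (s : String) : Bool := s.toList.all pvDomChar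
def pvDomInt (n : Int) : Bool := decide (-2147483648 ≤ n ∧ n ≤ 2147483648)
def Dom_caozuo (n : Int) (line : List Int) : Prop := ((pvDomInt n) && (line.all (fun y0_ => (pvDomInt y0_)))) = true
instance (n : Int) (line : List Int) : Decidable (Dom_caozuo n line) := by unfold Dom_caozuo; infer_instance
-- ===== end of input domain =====

-- B partitions by index parity in one pass and assembles once, instead of A's append-then-reverse per step.

-- ===== PORT A =====
def caozuo (n : Int) (line : List Int) : List Int :=
  let seq := line
  (PySem.List.pyRange 0 n 1).foldl
    (fun seqb i =>
      let seqb := seqb ++ [PySem.List.pyGetD seq i 0]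
      let tmp := seqb.reverse.foldl (fun t j => t ++ [j]) []
      tmp)
    []

-- ===== PORT B =====
def caozuo_alt (n : Int) (line : List Int) : List Int :=
  let p := (PySem.List.pyRange 0 n 1).foldl
    (fun (p : List Int × List Int) i =>
      if PySem.Int.mod i 2 = 0 then (p.1 ++ [PySem.List.pyGetD line i 0], p.2)
      else (p.1, p.2 ++ [PySem.List.pyGetD line i 0]))
    ([], [])
  if PySem.Int.mod n 2 = 1 then p.1.reverse ++ p.2 else p.2.reverse ++ p.1

-- ===== PRECONDITION & SPEC =====
-- Pre_ excludes exactly n > len(line), where A raises IndexError (seq[i] out of range).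
def Pre_caozuo (n : Int) (line : List Int) : Prop := n ≤ (line.length : Int)
instance (n : Int) (line : List Int) : Decidable (Pre_caozuo n line) := by unfold Pre_caozuo; infer_instance
def pvWitness_caozuo : Int × List Int := (3, [5, -2, 7])
def Spec_caozuo (n : Int) (line : List Int) (out : List Int) : Prop := out = caozuo_alt n line
instance (n : Int) (line : List Int) (out : List Int) : Decidable (Spec_caozuo n line out) := by unfold Spec_caozuo; infer_instance

-- ===== CLAIM (what is proved, stated in full; the proofs are below) =====
def Claim_equal_caozuo : Prop := ∀ (n : Int) (line : List Int), Dom_caozuo n line → Pre_caozuo n line → Spec_caozuo n line (caozuo n line)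

-- ===== LEMMAS AND PROOFS =====


-- (reverse of a list of singletons flattens back to the reversed list; what simp leaves behind)
theorem flatten_reverse_map_singleton (L : List Int) :
    (List.map (fun x => [x]) L).reverse.flatten = L.reverse := by
  induction L with
  | nil => simp
  | cons a t ih => simp [ih]

theorem flatten_map_singleton (L : List Int) :
    (List.map (fun x => [x]) L).flatten = L := by
  induction L with
  | nil => simp
  | cons a t ih => simp [ih]

-- Loop invariant: after k iterations, A's accumulator is B's two buckets assembled by the parity of k.
theorem caozuo_key (line : List Int) (k : Nat) :
    (PySem.List.pyRange 0 (k : Int) 1).foldl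
      (fun seqb i =>
        let seqb := seqb ++ [PySem.List.pyGetD line i 0]
        let tmp := seqb.reverse.foldl (fun t j => t ++ [j]) []
        tmp) []
    =
    (let p := (PySem.List.pyRange 0 (k : Int) 1).foldl
        (fun (p : List Int × List Int) i =>
          if PySem.Int.mod i 2 = 0 then (p.1 ++ [PySem.List.pyGetD line i 0], p.2)
          else (p.1, p.2 ++ [PySem.List.pyGetD line i 0]))
        ([], [])
      if k % 2 = 1 then p.1.reverse ++ p.2 else p.2.reverse ++ p.1) := by
  induction k with
  | zero => simp [PySem.List.pyRange_one_eq_nil]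
  | succ k ih =>
    have hcast : ((k + 1 : Nat) : Int) = (k : Int) + 1 := by push_cast; ring
    rw [hcast, PySem.List.pyRange_one_succ_right (by exact_mod_cast Nat.zero_le k), List.foldl_append,
      List.foldl_append, ih]
    have hmod : PySem.Int.mod (k : Int) 2 = ((k % 2 : Nat) : Int) := PySem.Int.mod_natCast k 2
    simp only [List.foldl_cons, List.foldl_nil, hmod]
    rcases Nat.even_or_odd k with hk | hk
    · have h0 : k % 2 = 0 := Nat.even_iff.mp hk
      have h1 : (k + 1) % 2 = 1 := by omega
      simp [h0, h1, List.reverse_append, flatten_reverse_map_singleton, flatten_map_singleton]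
    · have h1 : k % 2 = 1 := Nat.odd_iff.mp hk
      have h0 : (k + 1) % 2 = 0 := by omega
      simp [h0, h1, List.reverse_append, flatten_reverse_map_singleton, flatten_map_singleton]

-- ===== VERDICT (by name: the statement is the Claim_ definition above) =====
theorem caozuo_spec : Claim_equal_caozuo := by
  intro n line _ _
  unfold Spec_caozuo caozuo caozuo_alt
  rcases (by omega : n ≤ 0 ∨ 0 < n) with hn | hn
  · rcases lt_or_eq_of_le hn with hlt | heq
    · rw [PySem.List.pyRange_one_eq_nil hn]
      simp
    · subst heq
      rw [PySem.List.pyRange_one_eq_nil le_rfl]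
      simp
  · have hk : n = ((n.toNat : Nat) : Int) := by omega
    rw [hk]
    have := caozuo_key line n.toNat
    simp only at this
    rw [this]
    have hmod : PySem.Int.mod ((n.toNat : Nat) : Int) 2 = ((n.toNat % 2 : Nat) : Int) :=
      PySem.Int.mod_natCast n.toNat 2
    simp only [hmod]
    rcases Nat.even_or_odd n.toNat with h | h
    · have h0 : n.toNat % 2 = 0 := Nat.even_iff.mp h
      simp [h0]
    · have h1 : n.toNat % 2 = 1 := Nat.odd_iff.mp h
      simp [h1]
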